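-- pv_equiv track=rewrite | github.com/besthong/Algo | Codility/코딜리티 - MinAbsSum.py | solution
-- ===== SOURCE A (Python) =====
-- def solution(A):
--     total_sum = sum(abs(a) for a in A)
--     n = len(A)
--
--     # DP 배열 초기화 (총합의 절반까지만 계산)
--     dp = [False] * (total_sum // 2 + 1)
--     dp[0] = True  # 0은 항상 만들 수 있음
--
--     # DP 업데이트 (가능한 부분합을 추적)
--     for num in A:
--         num = abs(num)
--         for j in range(total_sum // 2, num - 1, -1):
--             dp[j] = dp[j] or dp[j - num]
--
--     # 가능한 합 중에서 절반 이하의 최대 합을 찾기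
--     for i in range(total_sum // 2, -1, -1):
--         if dp[i]:
--             return total_sum - 2 * i
-- ===== SOURCE B (Python) =====
-- def solution(A):
--     # Bounded-knapsack over distinct absolute values with multiplicities:
--     # dp[j] = remaining copies of the current value still usable after reaching sum j
--     # (>= 0 iff j is a reachable subset sum), one forward pass per distinct value.
--     total = 0
--     counts = {}
--     for a in A:
--         v = abs(a)
--         total += v
--         counts[v] = counts.get(v, 0) + 1
--     half = total // 2
--     dp = [-1] * (half + 1)
--     dp[0] = 0
--     for v, c in counts.items():
--         if v == 0 or v > half:
--             continue
--         for j in range(half + 1):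
--             if dp[j] >= 0:
--                 dp[j] = c
--             elif j >= v and dp[j - v] > 0:
--                 dp[j] = dp[j - v] - 1
--     best = 0
--     for j in range(half + 1):
--         if dp[j] >= 0:
--             best = j
--     return total - 2 * best
-- ===== Notes on version B (the rewrite author's own statement) =====
-- stated objective: alternative
-- what changed: Replaces the per-element 0/1 backward boolean DP by a bounded-knapsack reachability pass: occurrences are counted per distinct absolute value in a dict, and for each distinct value one forward pass propagates a remaining-copies counter (dp[j] = copies still usable after reaching j), so the DP runs once per distinct value instead of once per element.
import Mathlib
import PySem

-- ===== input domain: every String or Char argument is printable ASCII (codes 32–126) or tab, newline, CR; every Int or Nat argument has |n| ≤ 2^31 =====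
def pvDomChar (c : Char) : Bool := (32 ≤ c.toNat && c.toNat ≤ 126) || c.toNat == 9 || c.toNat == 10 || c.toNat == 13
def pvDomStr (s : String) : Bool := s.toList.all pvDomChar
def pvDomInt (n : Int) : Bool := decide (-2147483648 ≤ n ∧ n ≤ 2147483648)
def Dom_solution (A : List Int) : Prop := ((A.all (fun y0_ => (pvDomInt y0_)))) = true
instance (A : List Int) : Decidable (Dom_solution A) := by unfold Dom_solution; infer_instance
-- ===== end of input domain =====

-- B replaces A's per-element 0/1 backward boolean DP by a bounded-knapsack pass per
-- DISTINCT absolute value (a dict counter, then a forward remaining-copies DP); alternative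
-- algorithm of the same exact result.

-- ===== PORT A =====
-- literal port of A; the Python list dp is an Array Bool, dp[j] reads/writes use
-- getD/setIfInBounds (indices j of the loops are provably in range and nonnegative,
-- so .toNat and the in-bounds write are exact here).
-- Python's unused `n = len(A)` is omitted.  The trailing `none` branch of the final scan is
-- unreachable (dp[0] stays true): Python would fall through returning None there.
def solution (A : List Int) : Int :=
  let total : Int := (A.map (fun a => |a|)).sum
  let half : Int := PySem.Int.floordiv total 2
  let dp0 : Array Bool := (Array.replicate (half.toNat + 1) false).setIfInBounds 0 true
  let dpF : Array Bool := A.foldl (fun d num =>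
      let v := |num|
      (PySem.List.pyRange half (v - 1) (-1)).foldl
        (fun d j => d.setIfInBounds j.toNat (d.getD j.toNat false || d.getD (j - v).toNat false)) d) dp0
  match (PySem.List.pyRange half (-1) (-1)).find? (fun i => dpF.getD i.toNat false) with
  | some i => total - 2 * i
  | none => 0

-- ===== PORT B =====
-- literal port of Source B: one loop accumulates total and the dict counter (insertion order);
-- then one forward remaining-copies DP pass per distinct value (the Python short-circuit
-- `j >= v and dp[j-v] > 0` is the ∧-guard: the branch only fires when v ≤ j, so (j-v).toNat
-- is exact); then a forward scan keeping the last reachable index.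
def solution_alt (A : List Int) : Int :=
  let tc : Int × PySem.Dict Int Int := A.foldl (fun s a =>
      let v := |a|
      (s.1 + v, s.2.insert v (s.2.getD v 0 + 1))) (0, PySem.Dict.empty)
  let total : Int := tc.1
  let counts : PySem.Dict Int Int := tc.2
  let half : Int := PySem.Int.floordiv total 2
  let dp0 : Array Int := (Array.replicate (half.toNat + 1) (-1)).setIfInBounds 0 0
  let dpF : Array Int := counts.items.foldl (fun d p =>
      if p.1 = 0 ∨ half < p.1 then d
      else (PySem.List.pyRange 0 (half + 1) 1).foldl (fun d j =>
          if 0 ≤ d.getD j.toNat (-1) then d.setIfInBounds j.toNat p.2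
          else if p.1 ≤ j ∧ 0 < d.getD (j - p.1).toNat (-1) then
            d.setIfInBounds j.toNat (d.getD (j - p.1).toNat (-1) - 1)
          else d) d) dp0
  let best : Int := (PySem.List.pyRange 0 (half + 1) 1).foldl (fun b j =>
      if 0 ≤ dpF.getD j.toNat (-1) then j else b) 0
  total - 2 * best

-- ===== PRECONDITION & SPEC =====
def Spec_solution (A : List Int) (out : Int) : Prop := out = solution_alt A
instance (A : List Int) (out : Int) : Decidable (Spec_solution A out) := by unfold Spec_solution; infer_instance

-- ===== CLAIM (what is proved, stated in full; the proofs are below) =====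
def Claim_equal_solution : Prop := ∀ (A : List Int), Dom_solution A → Spec_solution A (solution A)

-- ===== LEMMAS AND PROOFS =====

-- reachable subset sums of a multiset of naturals, as a Bool-valued recursion
def canS : List Nat → Nat → Bool
  | [], j => decide (j = 0)
  | v :: L, j => canS L j || (decide (v ≤ j) && canS L (j - v))

lemma canS_zero (L : List Nat) : canS L 0 = true := by
  induction L with
  | nil => simp [canS]
  | cons v L ih => simp [canS, ih]

lemma canS_perm {L L' : List Nat} (h : L.Perm L') : ∀ j, canS L j = canS L' j := by
  induction h with
  | nil => intro j; rfl
  | cons x _ ih => intro j; simp [canS, ih]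
  | swap x y L =>
    intro j
    simp only [canS]
    by_cases hx : x ≤ j <;> by_cases hy : y ≤ j
    · by_cases hxy : x + y ≤ j
      · have h1 : x ≤ j - y := by omega
        have h2 : y ≤ j - x := by omega
        have h3 : j - y - x = j - x - y := by omega
        simp only [hx, hy, h1, h2, h3, decide_true, Bool.true_and]
        ac_rfl
      · have h1 : ¬ x ≤ j - y := by omega
        have h2 : ¬ y ≤ j - x := by omega
        simp only [hx, hy, h1, h2, decide_true, decide_false, Bool.true_and,
          Bool.false_and, Bool.or_false]
        ac_rfl
    · have h2 : ¬ y ≤ j - x := by omega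
      simp [hx, hy, h2]
    · have h1 : ¬ x ≤ j - y := by omega
      simp [hx, hy, h1]
    · simp [hx, hy]
  | trans _ _ ih1 ih2 => intro j; rw [ih1 j, ih2 j]

lemma canS_append_singleton (L : List Nat) (v j : Nat) :
    canS (L ++ [v]) j = (canS L j || (decide (v ≤ j) && canS L (j - v))) := by
  rw [canS_perm (List.perm_append_singleton v L) j]
  rfl

lemma canS_rep (c v : Nat) (L : List Nat) :
    ∀ j, (canS (List.replicate c v ++ L) j = true ↔
      ∃ k, k ≤ c ∧ k * v ≤ j ∧ canS L (j - k * v) = true) := by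
  induction c with
  | zero =>
    intro j
    constructor
    · intro h; exact ⟨0, by omega, by simpa using h⟩
    · rintro ⟨k, hk, _, h⟩
      interval_cases k
      simpa using h
  | succ c ih =>
    intro j
    simp only [List.replicate_succ, List.cons_append, canS, Bool.or_eq_true,
      Bool.and_eq_true, decide_eq_true_eq]
    constructor
    · rintro (h | ⟨hv, h⟩)
      · obtain ⟨k, hk, hkv, h⟩ := (ih j).mp h
        exact ⟨k, by omega, hkv, h⟩
      · obtain ⟨k, hk, hkv, h⟩ := (ih (j - v)).mp h
        refine ⟨k + 1, by omega, ?_, ?_⟩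
        · have : (k + 1) * v = k * v + v := by ring
          omega
        · have h1 : (k + 1) * v = k * v + v := by ring
          have h2 : j - (k + 1) * v = j - v - k * v := by omega
          rwa [h2]
    · rintro ⟨k, hk, hkv, h⟩
      match k with
      | 0 => exact Or.inl ((ih j).mpr ⟨0, by omega, by omega, h⟩)
      | k + 1 =>
        have h1 : (k + 1) * v = k * v + v := by ring
        refine Or.inr ⟨by omega, (ih (j - v)).mpr ⟨k, by omega, by omega, ?_⟩⟩
        have h2 : j - v - k * v = j - (k + 1) * v := by omega
        rwa [h2]

-- getD after an in-bounds write, fully cased (any element type)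
lemma getD_set_arr {α : Type} (d : Array α) (j i : Nat) (b dflt : α) :
    (d.setIfInBounds j b).getD i dflt = if i = j ∧ j < d.size then b else d.getD i dflt := by
  rw [Array.getD_eq_getD_getElem?, Array.getD_eq_getD_getElem?, Array.getElem?_setIfInBounds]
  by_cases h1 : j = i
  · subst h1
    by_cases h2 : j < d.size
    · simp [h2]
    · rw [if_pos rfl, if_neg h2, if_neg (by tauto), Array.getElem?_eq_none (by omega)]
  · rw [if_neg h1, if_neg (by tauto)]

-- one element of A, A-side inner loop, Nat-indexed form
def stepA (v : Nat) (d : Array Bool) (j : Nat) : Array Bool :=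
  d.setIfInBounds j (d.getD j false || d.getD (j - v) false)

lemma innerA (v a : Nat) (d : Array Bool) (ha : a < d.size) :
    ∀ n, v + n ≤ a + 1 →
      ((List.range n).foldl (fun c k => stepA v c (a - k)) d).size = d.size ∧
      ∀ i, ((List.range n).foldl (fun c k => stepA v c (a - k)) d).getD i false =
        if a < i + n ∧ i ≤ a then d.getD i false || d.getD (i - v) false
        else d.getD i false := by
  intro n
  induction n with
  | zero =>
    intro _
    refine ⟨rfl, fun i => ?_⟩
    rw [if_neg (by omega)]
    simp
  | succ n ih =>
    intro hn
    obtain ⟨hlen, hval⟩ := ih (by omega)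
    rw [List.range_succ, List.foldl_append]
    set c := (List.range n).foldl (fun c k => stepA v c (a - k)) d with hc
    simp only [List.foldl_cons, List.foldl_nil]
    constructor
    · simp [stepA, Array.size_setIfInBounds, hlen]
    · intro i
      rw [stepA, getD_set_arr]
      by_cases hi : i = a - n ∧ a - n < c.size
      · rw [if_pos hi]
        obtain ⟨rfl, _⟩ := hi
        have h1 : c.getD (a - n) false = d.getD (a - n) false := by
          rw [hval]; rw [if_neg (by omega)]
        have h2 : c.getD (a - n - v) false = d.getD (a - n - v) false := by
          rw [hval]; rw [if_neg (by omega)]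
        rw [h1, h2, if_pos (by omega)]
      · rw [if_neg hi]
        have hi' : ¬ i = a - n := by
          intro h; exact hi ⟨h, by omega⟩
        rw [hval]
        by_cases hr : a < i + n ∧ i ≤ a
        · rw [if_pos hr, if_pos (by omega)]
        · rw [if_neg hr, if_neg (by omega)]

-- the A-side inner loop over pyRange equals the Nat-indexed stepA fold
lemma port_inner_eq (half v : Int) (hv : 0 ≤ v) (hh : 0 ≤ half) (d : Array Bool) :
    (PySem.List.pyRange half (v - 1) (-1)).foldl
      (fun d j => d.setIfInBounds j.toNat (d.getD j.toNat false || d.getD (j - v).toNat false)) d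
    = (List.range ((half + 1 - v).toNat)).foldl
        (fun c k => stepA v.toNat c (half.toNat - k)) d := by
  rw [PySem.List.pyRange_neg_one, List.foldl_map]
  have hn : (half - (v - 1)).toNat = (half + 1 - v).toNat := by omega
  rw [hn]
  apply PySem.List.foldl_congr_mem
  intro acc k hk
  have hk' : (k : Int) < half + 1 - v := by
    have := List.mem_range.mp hk
    omega
  have h1 : (half - (k : Int)).toNat = half.toNat - k := by omega
  have h2 : (half - (k : Int) - v).toNat = half.toNat - k - v.toNat := by omega
  rw [stepA, h1, h2]

-- A-side outer fold: dp cells ≤ half track canS of the processed prefix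
lemma outerA (half : Int) (hh : 0 ≤ half) :
    ∀ (L : List Int) (d : Array Bool) (P : List Nat),
      d.size = half.toNat + 1 →
      (∀ j, j ≤ half.toNat → d.getD j false = canS P j) →
      (L.foldl (fun d num =>
          let v := |num|
          (PySem.List.pyRange half (v - 1) (-1)).foldl
            (fun d j => d.setIfInBounds j.toNat (d.getD j.toNat false || d.getD (j - v).toNat false)) d) d).size
        = half.toNat + 1 ∧
      ∀ j, j ≤ half.toNat →
        (L.foldl (fun d num =>
            let v := |num|
            (PySem.List.pyRange half (v - 1) (-1)).foldl
              (fun d j => d.setIfInBounds j.toNat (d.getD j.toNat false || d.getD (j - v).toNat false)) d) d).getD j false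
          = canS (P ++ L.map (fun a => (|a|).toNat)) j := by
  intro L
  induction L with
  | nil =>
    intro d P h1 h2
    exact ⟨h1, by simpa using h2⟩
  | cons x L ih =>
    intro d P hlen hcorr
    simp only [List.foldl_cons]
    set v : Int := |x| with hv
    have hv0 : 0 ≤ v := abs_nonneg x
    rw [port_inner_eq half v hv0 hh]
    have ha : half.toNat < d.size := by omega
    by_cases hvh : v ≤ half + 1
    · obtain ⟨hlen1, hval1⟩ :=
        innerA v.toNat half.toNat d ha ((half + 1 - v).toNat) (by omega)
      set dn := (List.range ((half + 1 - v).toNat)).foldl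
        (fun c k => stepA v.toNat c (half.toNat - k)) d with hdn
      have hmain := ih dn (P ++ [v.toNat]) (by rw [hdn, hlen1]; omega) (fun j hj => by
        rw [hdn, hval1, canS_append_singleton]
        by_cases hc : half.toNat < j + (half + 1 - v).toNat ∧ j ≤ half.toNat
        · rw [if_pos hc]
          have hvj : v.toNat ≤ j := by omega
          rw [hcorr j hj, hcorr (j - v.toNat) (by omega)]
          simp [hvj]
        · rw [if_neg hc]
          have hvj : ¬ v.toNat ≤ j := by omega
          rw [hcorr j hj]
          simp [hvj])
      simpa using hmain
    · have hn0 : (half + 1 - v).toNat = 0 := by omega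
      rw [hn0]
      simp only [List.range_zero, List.foldl_nil]
      have hmain := ih d (P ++ [v.toNat]) hlen (fun j hj => by
        rw [canS_append_singleton]
        have hvj : ¬ v.toNat ≤ j := by omega
        rw [hcorr j hj]
        simp [hvj])
      simpa using hmain

-- B-side: value that the forward remaining-copies pass writes at cell j
def bval (old : Nat → Int) (v : Nat) (c : Int) (j : Nat) : Int :=
  if 0 ≤ old j then c
  else if h : 0 < v ∧ v ≤ j then
    (if 0 < bval old v c (j - v) then bval old v c (j - v) - 1 else -1)
  else -1
termination_by j
decreasing_by omega

-- min-copies characterisation of bval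
lemma bval_spec (old : Nat → Int) (v : Nat) (c : Int) (hv : 0 < v) (hc : 0 ≤ c) : ∀ j,
    (bval old v c j = -1 ∧ ∀ k : Nat, (k : Int) ≤ c → k * v ≤ j → ¬ 0 ≤ old (j - k * v)) ∨
    (∃ k : Nat, ((k : Int) ≤ c ∧ k * v ≤ j ∧ 0 ≤ old (j - k * v)) ∧ bval old v c j = c - k ∧
       ∀ k' : Nat, (k' : Int) ≤ c → k' * v ≤ j → 0 ≤ old (j - k' * v) → k ≤ k') := by
  intro j
  induction j using Nat.strong_induction_on with
  | _ j ih =>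
    rw [bval]
    by_cases h0 : 0 ≤ old j
    · right
      refine ⟨0, ⟨by omega, by omega, by simpa using h0⟩, by simp [h0], fun k' _ _ _ => Nat.zero_le _⟩
    · rw [if_neg h0]
      by_cases hvj : v ≤ j
      · rw [dif_pos ⟨hv, hvj⟩]
        rcases ih (j - v) (by omega) with ⟨hB, hemp⟩ | ⟨k₀, ⟨hk₀c, hk₀v, hk₀old⟩, hBval, hk₀min⟩
        · rw [hB, if_neg (by omega)]
          left
          refine ⟨rfl, fun k hkc hkv hold => ?_⟩
          match k with
          | 0 => exact h0 (by simpa using hold)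
          | k + 1 =>
            have h1 : (k + 1) * v = k * v + v := by ring
            refine hemp k (by push_cast at hkc ⊢; omega) (by omega) ?_
            have h2 : j - v - k * v = j - (k + 1) * v := by omega
            rwa [h2]
        · by_cases hpos : 0 < bval old v c (j - v)
          · rw [if_pos hpos]
            right
            refine ⟨k₀ + 1, ⟨?_, ?_, ?_⟩, ?_, ?_⟩
            · rw [hBval] at hpos; push_cast; omega
            · have h1 : (k₀ + 1) * v = k₀ * v + v := by ring
              omega
            · have h2 : j - (k₀ + 1) * v = j - v - k₀ * v := by
                have h1 : (k₀ + 1) * v = k₀ * v + v := by ring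
                omega
              rwa [h2]
            · rw [hBval]; push_cast; ring
            · intro k' hkc hkv hold
              match k' with
              | 0 => exact absurd (by simpa using hold) h0
              | k' + 1 =>
                have h1 : (k' + 1) * v = k' * v + v := by ring
                have := hk₀min k' (by push_cast at hkc ⊢; omega) (by omega) (by
                  have h2 : j - v - k' * v = j - (k' + 1) * v := by omega
                  rwa [h2])
                omega
          · rw [if_neg hpos]
            left
            refine ⟨rfl, fun k hkc hkv hold => ?_⟩
            match k with
            | 0 => exact h0 (by simpa using hold)
            | k + 1 =>
              have h1 : (k + 1) * v = k * v + v := by ring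
              have hmem := hk₀min k (by push_cast at hkc ⊢; omega) (by omega) (by
                have h2 : j - v - k * v = j - (k + 1) * v := by omega
                rwa [h2])
              rw [hBval] at hpos
              push_cast at hkc
              omega
      · rw [dif_neg (by omega)]
        left
        refine ⟨rfl, fun k hkc hkv hold => ?_⟩
        match k with
        | 0 => exact h0 (by simpa using hold)
        | k + 1 =>
          have h1 : (k + 1) * v = k * v + v := by ring
          omega

lemma bval_nonneg_iff (old : Nat → Int) (v : Nat) (c : Int) (hv : 0 < v) (hc : 0 ≤ c) (j : Nat) :
    (0 ≤ bval old v c j) ↔ ∃ k : Nat, (k : Int) ≤ c ∧ k * v ≤ j ∧ 0 ≤ old (j - k * v) := by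
  rcases bval_spec old v c hv hc j with ⟨hB, hemp⟩ | ⟨k, ⟨h1, h2, h3⟩, hB, _⟩
  · rw [hB]
    constructor
    · omega
    · rintro ⟨k, hk1, hk2, hk3⟩; exact absurd hk3 (hemp k hk1 hk2)
  · rw [hB]
    exact ⟨fun _ => ⟨k, h1, h2, h3⟩, fun _ => by omega⟩

lemma bval_neg_eq (old : Nat → Int) (v : Nat) (c : Int) (hv : 0 < v) (hc : 0 ≤ c) (j : Nat)
    (h : bval old v c j < 0) : bval old v c j = -1 := by
  rcases bval_spec old v c hv hc j with ⟨hB, _⟩ | ⟨k, ⟨h1, _, _⟩, hB, _⟩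
  · exact hB
  · rw [hB] at h ⊢; omega

-- B-side inner pass, Nat-indexed step
def stepB (v : Nat) (c : Int) (d : Array Int) (k : Nat) : Array Int :=
  if 0 ≤ d.getD k (-1) then d.setIfInBounds k c
  else if v ≤ k ∧ 0 < d.getD (k - v) (-1) then d.setIfInBounds k (d.getD (k - v) (-1) - 1)
  else d

-- the forward pass computes bval on the processed prefix and leaves the rest untouched
lemma innerB (v : Nat) (c : Int) (d : Array Int) (hv : 0 < v)
    (hneg : ∀ i, d.getD i (-1) < 0 → d.getD i (-1) = -1) :
    ∀ m, m ≤ d.size →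
      ((List.range m).foldl (stepB v c) d).size = d.size ∧
      (∀ i, i < m → ((List.range m).foldl (stepB v c) d).getD i (-1)
          = bval (fun n => d.getD n (-1)) v c i) ∧
      (∀ i, m ≤ i → ((List.range m).foldl (stepB v c) d).getD i (-1) = d.getD i (-1)) := by
  intro m
  induction m with
  | zero => intro _; exact ⟨rfl, fun i hi => absurd hi (by omega), fun i _ => rfl⟩
  | succ m ih =>
    intro hm
    obtain ⟨hsz, hlow, hhigh⟩ := ih (by omega)
    rw [List.range_succ, List.foldl_append]
    set dm := (List.range m).foldl (stepB v c) d with hdm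
    simp only [List.foldl_cons, List.foldl_nil]
    have hmem : m < dm.size := by omega
    have hdmm : dm.getD m (-1) = d.getD m (-1) := hhigh m (by omega)
    have hstep : ∀ i, (stepB v c dm m).getD i (-1)
        = if i = m then bval (fun n => d.getD n (-1)) v c m else dm.getD i (-1) := by
      intro i
      rw [stepB, hdmm]
      by_cases h0 : 0 ≤ d.getD m (-1)
      · rw [if_pos h0, getD_set_arr]
        by_cases hi : i = m
        · subst hi
          rw [if_pos ⟨rfl, hmem⟩, if_pos rfl, bval, if_pos h0]
        · rw [if_neg (by tauto), if_neg hi]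
      · rw [if_neg h0]
        have hm1 : d.getD m (-1) = -1 := hneg m (by omega)
        by_cases hvm : v ≤ m
        · have hsub : dm.getD (m - v) (-1) = bval (fun n => d.getD n (-1)) v c (m - v) :=
            hlow (m - v) (by omega)
          by_cases hp : 0 < dm.getD (m - v) (-1)
          · rw [if_pos ⟨hvm, hp⟩, getD_set_arr]
            by_cases hi : i = m
            · subst hi
              rw [if_pos ⟨rfl, hmem⟩, if_pos rfl, bval, if_neg h0, dif_pos ⟨hv, hvm⟩,
                if_pos (by rw [← hsub]; exact hp), hsub]
            · rw [if_neg (by tauto), if_neg hi]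
          · rw [if_neg (by tauto)]
            by_cases hi : i = m
            · subst hi
              rw [if_pos rfl, bval, if_neg h0, dif_pos ⟨hv, hvm⟩,
                if_neg (by rw [← hsub]; exact hp), hdmm, hm1]
            · rw [if_neg hi]
        · rw [if_neg (by tauto)]
          by_cases hi : i = m
          · subst hi
            rw [if_pos rfl, bval, if_neg h0, dif_neg (by tauto), hdmm, hm1]
          · rw [if_neg hi]
    refine ⟨?_, fun i hi => ?_, fun i hi => ?_⟩
    · rw [stepB]
      split_ifs <;> simp [Array.size_setIfInBounds, hsz]
    · rw [hstep]
      by_cases hi' : i = m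
      · rw [if_pos hi', hi']
      · rw [if_neg hi']
        exact hlow i (by omega)
    · rw [hstep, if_neg (by omega)]
      exact hhigh i (by omega)

-- B-side port inner fold over pyRange equals the Nat-indexed stepB fold
lemma portB_inner_eq (half v c : Int) (hh : 0 ≤ half) (hv : 0 ≤ v) (d : Array Int) :
    (PySem.List.pyRange 0 (half + 1) 1).foldl (fun d j =>
        if 0 ≤ d.getD j.toNat (-1) then d.setIfInBounds j.toNat c
        else if v ≤ j ∧ 0 < d.getD (j - v).toNat (-1) then
          d.setIfInBounds j.toNat (d.getD (j - v).toNat (-1) - 1)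
        else d) d
    = (List.range (half.toNat + 1)).foldl (stepB v.toNat c) d := by
  rw [PySem.List.pyRange_one, List.foldl_map]
  have hn : (half + 1 - 0).toNat = half.toNat + 1 := by omega
  rw [hn]
  apply PySem.List.foldl_congr_mem
  intro acc k _
  have h0 : ((0 : Int) + (k : Int)).toNat = k := by omega
  have h1 : ((0 : Int) + (k : Int) - v).toNat = k - v.toNat := by omega
  have h2 : (v ≤ (0 : Int) + (k : Int)) ↔ (v.toNat ≤ k) := by omega
  simp only [stepB, h0, h1, h2]

-- B-side outer fold over the counter items
lemma outerB (half : Int) (hh : 0 ≤ half) :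
    ∀ (It : List (Int × Int)) (d : Array Int) (P : List Nat),
      (∀ p ∈ It, 0 ≤ p.1 ∧ 0 ≤ p.2) →
      d.size = half.toNat + 1 →
      (∀ i, d.getD i (-1) < 0 → d.getD i (-1) = -1) →
      (∀ j, j ≤ half.toNat → ((0 ≤ d.getD j (-1)) ↔ canS P j = true)) →
      (It.foldl (fun d p =>
          if p.1 = 0 ∨ half < p.1 then d
          else (PySem.List.pyRange 0 (half + 1) 1).foldl (fun d j =>
              if 0 ≤ d.getD j.toNat (-1) then d.setIfInBounds j.toNat p.2
              else if p.1 ≤ j ∧ 0 < d.getD (j - p.1).toNat (-1) then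
                d.setIfInBounds j.toNat (d.getD (j - p.1).toNat (-1) - 1)
              else d) d) d).size = half.toNat + 1 ∧
      ∀ j, j ≤ half.toNat →
        ((0 ≤ (It.foldl (fun d p =>
            if p.1 = 0 ∨ half < p.1 then d
            else (PySem.List.pyRange 0 (half + 1) 1).foldl (fun d j =>
                if 0 ≤ d.getD j.toNat (-1) then d.setIfInBounds j.toNat p.2
                else if p.1 ≤ j ∧ 0 < d.getD (j - p.1).toNat (-1) then
                  d.setIfInBounds j.toNat (d.getD (j - p.1).toNat (-1) - 1)
                else d) d) d).getD j (-1)) ↔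
          canS (P ++ It.flatMap (fun p => List.replicate p.2.toNat p.1.toNat)) j = true) := by
  intro It
  induction It with
  | nil =>
    intro d P _ hsz _ hinv
    exact ⟨hsz, fun j hj => by simpa using hinv j hj⟩
  | cons p It ih =>
    intro d P hpos hsz hneg hinv
    obtain ⟨hv0, hc0⟩ := hpos p (List.mem_cons_self ..)
    simp only [List.foldl_cons, List.flatMap_cons, ← List.append_assoc]
    -- canS of P with the replicate block appended, in terms of canS P
    have hrep : ∀ j, canS (P ++ List.replicate p.2.toNat p.1.toNat) j = true ↔
        ∃ k, k ≤ p.2.toNat ∧ k * p.1.toNat ≤ j ∧ canS P (j - k * p.1.toNat) = true := by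
      intro j
      rw [canS_perm (List.perm_append_comm (l₁ := P)) j, canS_rep]
    by_cases hguard : p.1 = 0 ∨ half < p.1
    · rw [if_pos hguard]
      refine ih d (P ++ List.replicate p.2.toNat p.1.toNat)
        (fun q hq => hpos q (List.mem_cons_of_mem _ hq)) hsz hneg ?_
      intro j hj
      rw [hrep j, hinv j hj]
      constructor
      · intro h
        exact ⟨0, by omega, by omega, by simpa using h⟩
      · intro h
        obtain ⟨k, hk, hkv, hcan⟩ := h
        rcases hguard with h0 | hhv
        · have : k * p.1.toNat = 0 := by simp [h0]
          rw [this] at hcan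
          simpa using hcan
        · match k with
          | 0 => simpa using hcan
          | k + 1 =>
            exfalso
            have h1 : p.1.toNat ≤ (k + 1) * p.1.toNat := by
              have : (k + 1) * p.1.toNat = k * p.1.toNat + p.1.toNat := by ring
              omega
            omega
    · rw [if_neg hguard]
      have hv1 : 1 ≤ p.1 := by omega
      have hvh : p.1 ≤ half := by omega
      rw [portB_inner_eq half p.1 p.2 hh hv0 d]
      have hvN : 0 < p.1.toNat := by omega
      obtain ⟨hsz1, hlow, hhigh⟩ := innerB p.1.toNat p.2 d hvN hneg (half.toNat + 1) (by omega)
      set dn := (List.range (half.toNat + 1)).foldl (stepB p.1.toNat p.2) d with hdn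
      have hval : ∀ j, j ≤ half.toNat →
          dn.getD j (-1) = bval (fun n => d.getD n (-1)) p.1.toNat p.2 j := by
        intro j hj
        exact hlow j (by omega)
      have hneg1 : ∀ i, dn.getD i (-1) < 0 → dn.getD i (-1) = -1 := by
        intro i hneg'
        by_cases hi : i ≤ half.toNat
        · rw [hval i hi] at hneg' ⊢
          exact bval_neg_eq _ _ _ hvN hc0 i hneg'
        · rw [hhigh i (by omega)] at hneg' ⊢
          exact hneg i hneg'
      have hinv1 : ∀ j, j ≤ half.toNat →
          ((0 ≤ dn.getD j (-1)) ↔ canS (P ++ List.replicate p.2.toNat p.1.toNat) j = true) := by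
        intro j hj
        rw [hval j hj, bval_nonneg_iff _ _ _ hvN hc0, hrep]
        constructor
        · rintro ⟨k, hk, hkv, hold⟩
          refine ⟨k, by omega, hkv, ?_⟩
          rw [← hinv (j - k * p.1.toNat) (by omega)]
          exact hold
        · rintro ⟨k, hk, hkv, hcan⟩
          refine ⟨k, by omega, hkv, ?_⟩
          rw [hinv (j - k * p.1.toNat) (by omega)]
          exact hcan
      exact ih dn (P ++ List.replicate p.2.toNat p.1.toNat)
        (fun q hq => hpos q (List.mem_cons_of_mem _ hq)) (by omega) hneg1 hinv1

-- the pair fold of Source B splits into the sum and the counter fold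
lemma fold_pair (A : List Int) :
    ∀ (t0 : Int) (d0 : PySem.Dict Int Int),
    A.foldl (fun s a => (s.1 + |a|, s.2.insert (|a|) (s.2.getD (|a|) 0 + 1))) (t0, d0)
      = (t0 + (A.map (fun a => |a|)).sum,
         (A.map (fun a => |a|)).foldl (fun d x => d.insert x (d.getD x 0 + 1)) d0) := by
  induction A with
  | nil => intro t0 d0; simp
  | cons a A ih =>
    intro t0 d0
    simp only [List.foldl_cons, List.map_cons, List.sum_cons, ih]
    simp [add_assoc]
  
-- the flattened counter items are a permutation of the absolute values
lemma flat_counter_perm (xs : List Int) (hpos : ∀ x ∈ xs, 0 ≤ x) :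
    ((PySem.Dict.counter xs).items.flatMap
        (fun p => List.replicate p.2.toNat p.1.toNat)).Perm
      (xs.map Int.toNat) := by
  rw [PySem.Dict.items_counter, List.flatMap_map]
  simp only [Int.toNat_natCast]
  apply List.perm_iff_count.mpr
  intro n
  have hcnt : ∀ (S : List Int), S.Nodup → (∀ k ∈ S, 0 ≤ k) →
      (S.flatMap (fun k => List.replicate (xs.count k) k.toNat)).count n
        = if (n : Int) ∈ S then xs.count (n : Int) else 0 := by
    intro S
    induction S with
    | nil => simp
    | cons k S ih =>
      intro hnd hp
      rw [List.flatMap_cons, List.count_append, List.count_replicate,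
        ih (List.nodup_cons.mp hnd).2 (fun q hq => hp q (List.mem_cons_of_mem _ hq))]
      have hk0 : 0 ≤ k := hp k (List.mem_cons_self ..)
      by_cases hnk : (n : Int) = k
      · have h1 : (k.toNat == n) = true := by
          simp only [beq_iff_eq]; omega
        have h2 : (n : Int) ∉ S := by
          rw [hnk]; exact (List.nodup_cons.mp hnd).1
        rw [if_pos h1, if_neg h2, if_pos (by rw [hnk]; exact List.mem_cons_self ..), hnk]
        omega
      · have h1 : ¬ ((k.toNat == n) = true) := by
          simp only [beq_iff_eq]; omega
        rw [if_neg h1]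
        simp [List.mem_cons, hnk]
  rw [hcnt (PySem.Set.ofList xs) (PySem.Set.nodup_ofList xs)
    (fun k hk => hpos k (by rwa [PySem.Set.mem_ofList] at hk))]
  have hmap : (xs.map Int.toNat).count n = xs.count (n : Int) := by
    rw [List.count_eq_countP, List.count_eq_countP, List.countP_map]
    apply List.countP_congr
    intro x hx
    have hx0 : 0 ≤ x := hpos x hx
    simp only [Function.comp_apply, beq_iff_eq]
    constructor
    · intro h; omega
    · intro h; omega
  rw [hmap]
  by_cases hmem : (n : Int) ∈ PySem.Set.ofList xs
  · rw [if_pos hmem]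
  · rw [if_neg hmem]
    rw [PySem.Set.mem_ofList] at hmem
    exact (List.count_eq_zero.mpr hmem).symm

-- first hit of a descending scan
lemma find_desc (p : Nat → Bool) :
    ∀ (m t : Nat), t ≤ m → p t = true → (∀ k, t < k → p k = false) →
      (List.range (m + 1)).find? (fun k => p (m - k)) = some (m - t) := by
  intro m
  induction m with
  | zero =>
    intro t ht hp _
    interval_cases t
    simp [List.range_succ, hp]
  | succ m ih =>
    intro t ht hp hab
    rw [List.range_succ_eq_map, List.find?_cons]
    by_cases hm : t = m + 1
    · subst hm
      simp only [Nat.sub_zero, hp]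
      simp
    · have hpm : p (m + 1 - 0) = false := hab _ (by omega)
      simp only [Nat.sub_zero] at hpm
      simp only [Nat.sub_zero, hpm]
      rw [List.find?_map]
      have hfun : ((fun k => p (m + 1 - k)) ∘ Nat.succ) = (fun k => p (m - k)) := by
        funext k
        simp only [Function.comp_apply]
        congr 1
        omega
      rw [hfun, ih t (by omega) hp hab]
      simp only [Option.map_some]
      congr 1
      omega

-- find? congruence on members
lemma find?_congr_mem {α : Type} {l : List α} {p q : α → Bool}
    (h : ∀ x ∈ l, p x = q x) : l.find? p = l.find? q := by
  induction l with
  | nil => rfl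
  | cons x l ih =>
    rw [List.find?_cons, List.find?_cons, h x (List.mem_cons_self ..)]
    split
    · rfl
    · exact ih (fun y hy => h y (List.mem_cons_of_mem _ hy))

-- last hit of an ascending scan
lemma foldl_best (p : Nat → Bool) :
    ∀ (m t : Nat) (b0 : Int), t ≤ m → p t = true → (∀ k, t < k → p k = false) →
      (List.range (m + 1)).foldl (fun b j => if p j then (j : Int) else b) b0 = t := by
  intro m
  induction m with
  | zero =>
    intro t b0 ht hp _
    interval_cases t
    simp [List.range_succ, hp]
  | succ m ih =>
    intro t b0 ht hp hab
    rw [List.range_succ, List.foldl_append]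
    simp only [List.foldl_cons, List.foldl_nil]
    by_cases hm : t = m + 1
    · subst hm
      simp [hp]
    · have hpm : p (m + 1) = false := hab _ (by omega)
      simp only [hpm, Bool.false_eq_true, if_false]
      exact ih t b0 (by omega) hp hab

-- ===== VERDICT (by name: the statement is the Claim_ definition above) =====
theorem solution_spec : Claim_equal_solution := by
  intro A _
  unfold Spec_solution solution solution_alt
  simp only []
  rw [fold_pair A 0 PySem.Dict.empty]
  simp only []
  set xs : List Int := A.map (fun a => |a|) with hxs
  have hxpos : ∀ x ∈ xs, 0 ≤ x := by
    intro x hx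
    obtain ⟨a, _, rfl⟩ := List.mem_map.mp hx
    exact abs_nonneg a
  set total : Int := xs.sum with htotal
  have htot0 : 0 ≤ total := List.sum_nonneg hxpos
  set half : Int := PySem.Int.floordiv total 2 with hhalf
  have hh : 0 ≤ half := by
    rw [hhalf, PySem.Int.floordiv]
    exact Int.fdiv_nonneg htot0 (by norm_num)
  set hN : Nat := half.toNat with hhN
  have hzero : (0 : Int) + total = total := by ring
  rw [hzero]
  -- the counter
  rw [PySem.Dict.foldl_insert_getD_add_one_eq_counter]
  have hitems : ∀ p ∈ (PySem.Dict.counter xs).items, 0 ≤ p.1 ∧ 0 ≤ p.2 := by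
    intro p hp
    rw [PySem.Dict.items_counter] at hp
    obtain ⟨k, hk, rfl⟩ := List.mem_map.mp hp
    rw [PySem.Set.mem_ofList] at hk
    exact ⟨hxpos k hk, by positivity⟩
  -- the common reachability predicate and its greatest witness
  set vals : List Nat := xs.map Int.toNat with hvals
  set p : Nat → Bool := fun j => canS vals j with hp
  have hp0 : p 0 = true := canS_zero vals
  set t : Nat := Nat.findGreatest (fun j => p j = true) hN with ht
  have htle : t ≤ hN := Nat.findGreatest_le hN
  have hpt : p t = true := by
    have h := Nat.findGreatest_spec (P := fun j => p j = true) (Nat.zero_le hN) hp0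
    rw [← ht] at h
    exact h
  have hmax : ∀ k, t < k → k ≤ hN → p k = false := by
    intro k hk hk2
    have := Nat.findGreatest_is_greatest (P := fun j => p j = true) hk hk2
    simpa using this
  -- ===== A side =====
  set d0A : Array Bool := (Array.replicate (hN + 1) false).setIfInBounds 0 true with hd0A
  have hlen0A : d0A.size = hN + 1 := by simp [hd0A]
  have hcorr0A : ∀ j, j ≤ hN → d0A.getD j false = canS [] j := by
    intro j hj
    rw [hd0A, getD_set_arr]
    by_cases hj0 : j = 0
    · subst hj0
      rw [if_pos (by simp)]
      simp [canS]
    · rw [if_neg (by intro h; exact hj0 h.1)]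
      rcases Nat.exists_eq_succ_of_ne_zero hj0 with ⟨i, rfl⟩
      rw [Array.getD_eq_getD_getElem?, Array.getElem?_replicate]
      have hif : ∀ o : Option Bool, (o = some false ∨ o = none) → o.getD false = false := by
        rintro o (rfl | rfl) <;> rfl
      rw [hif _ (by split <;> simp)]
      simp [canS]
  obtain ⟨hlenFA, hcorrFA⟩ := outerA half hh A d0A [] hlen0A hcorr0A
  set dFA := A.foldl (fun d num =>
      let v := |num|
      (PySem.List.pyRange half (v - 1) (-1)).foldl
        (fun d j => d.setIfInBounds j.toNat (d.getD j.toNat false || d.getD (j - v).toNat false)) d) d0A with hdFA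
  have hmapeq : A.map (fun a => (|a|).toNat) = vals := by
    rw [hvals, hxs, List.map_map]
    rfl
  have hvalA : ∀ j, j ≤ hN → dFA.getD j false = p j := by
    intro j hj
    rw [hdFA]
    have := hcorrFA j hj
    rw [List.nil_append, hmapeq] at this
    exact this
  have hoobA : ∀ k, hN < k → dFA.getD k false = false := by
    intro k hk
    rw [Array.getD_eq_getD_getElem?, Array.getElem?_eq_none (by omega)]
    rfl
  -- ===== B side =====
  set d0B : Array Int := (Array.replicate (hN + 1) (-1)).setIfInBounds 0 0 with hd0B
  have hlen0B : d0B.size = hN + 1 := by simp [hd0B]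
  have hval0B : ∀ j, d0B.getD j (-1) = if j = 0 ∧ j ≤ hN then 0 else -1 := by
    intro j
    rw [hd0B, getD_set_arr]
    by_cases hj0 : j = 0
    · subst hj0
      rw [if_pos ⟨rfl, by simp⟩, if_pos ⟨rfl, by omega⟩]
    · rw [if_neg (fun h => hj0 h.1), if_neg (fun h => hj0 h.1)]
      rw [Array.getD_eq_getD_getElem?, Array.getElem?_replicate]
      split <;> rfl
  have hneg0B : ∀ i, d0B.getD i (-1) < 0 → d0B.getD i (-1) = -1 := by
    intro i h
    rw [hval0B] at h ⊢
    by_cases hc : i = 0 ∧ i ≤ hN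
    · rw [if_pos hc] at h; omega
    · rw [if_neg hc]
  have hcorr0B : ∀ j, j ≤ hN → ((0 ≤ d0B.getD j (-1)) ↔ canS [] j = true) := by
    intro j hj
    rw [hval0B]
    by_cases hj0 : j = 0
    · subst hj0
      simp [canS]
    · rw [if_neg (by tauto)]
      simp [canS, hj0]
  obtain ⟨hlenFB, hcorrFB⟩ :=
    outerB half hh (PySem.Dict.counter xs).items d0B [] hitems hlen0B hneg0B hcorr0B
  set dFB := ((PySem.Dict.counter xs).items).foldl (fun d p =>
      if p.1 = 0 ∨ half < p.1 then d
      else (PySem.List.pyRange 0 (half + 1) 1).foldl (fun d j =>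
          if 0 ≤ d.getD j.toNat (-1) then d.setIfInBounds j.toNat p.2
          else if p.1 ≤ j ∧ 0 < d.getD (j - p.1).toNat (-1) then
            d.setIfInBounds j.toNat (d.getD (j - p.1).toNat (-1) - 1)
          else d) d) d0B with hdFB
  have hvalB : ∀ j, j ≤ hN → ((0 ≤ dFB.getD j (-1)) ↔ p j = true) := by
    intro j hj
    rw [hdFB]
    have h1 := hcorrFB j hj
    rw [List.nil_append] at h1
    rw [h1, hp]
    rw [canS_perm (flat_counter_perm xs hxpos) j]
  have hoobB : ∀ k, hN < k → dFB.getD k (-1) = -1 := by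
    intro k hk
    rw [Array.getD_eq_getD_getElem?, Array.getElem?_eq_none (by omega)]
    rfl
  -- ===== A's final descending scan =====
  have hrangeA : PySem.List.pyRange half (-1) (-1)
      = (List.range (hN + 1)).map (fun k : Nat => half - (k : Int)) := by
    rw [PySem.List.pyRange_neg_one]
    have hcnt : (half - (-1)).toNat = hN + 1 := by omega
    rw [hcnt]
  have hfindA : (PySem.List.pyRange half (-1) (-1)).find?
      (fun i => dFA.getD i.toNat false) = some ((half : Int) - ((hN - t : Nat) : Int)) := by
    rw [hrangeA, List.find?_map,
      find?_congr_mem (q := fun k => dFA.getD (hN - k) false) (by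
        intro k hk
        have hk' : k < hN + 1 := List.mem_range.mp hk
        simp only [Function.comp_apply]
        have h1 : (half - (k : Int)).toNat = hN - k := by omega
        rw [h1]),
      find_desc (fun i => dFA.getD i false) hN t htle
        (by show dFA.getD t false = true; rw [hvalA t htle]; exact hpt) (by
        intro k hk
        show dFA.getD k false = false
        by_cases hkN : k ≤ hN
        · rw [hvalA k hkN]; exact hmax k hk hkN
        · exact hoobA k (by omega))]
    rfl
  rw [hfindA]
  -- ===== B's final ascending scan =====
  have hfoldB : (PySem.List.pyRange 0 (half + 1) 1).foldl
      (fun b j => if 0 ≤ dFB.getD j.toNat (-1) then j else b) 0 = (t : Int) := by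
    rw [PySem.List.pyRange_one, List.foldl_map]
    have hn : (half + 1 - 0).toNat = hN + 1 := by omega
    rw [hn]
    have hstep : List.foldl
        (fun (x : Int) (y : Nat) => if 0 ≤ dFB.getD ((0 : Int) + (y : Int)).toNat (-1)
          then (0 : Int) + (y : Int) else x) 0 (List.range (hN + 1))
        = List.foldl (fun (b : Int) (k : Nat) =>
            if (decide (0 ≤ dFB.getD k (-1))) = true then (k : Int) else b) 0
            (List.range (hN + 1)) := by
      apply PySem.List.foldl_congr_mem
      intro acc k _
      have h0 : ((0 : Int) + (k : Int)).toNat = k := by omega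
      have h1 : (0 : Int) + (k : Int) = (k : Int) := by omega
      rw [h0, h1]
      by_cases hc : 0 ≤ dFB.getD k (-1)
      · rw [if_pos hc, if_pos (by simpa using hc)]
      · rw [if_neg hc, if_neg (by simpa using hc)]
    rw [hstep]
    exact foldl_best (fun k => decide (0 ≤ dFB.getD k (-1))) hN t 0 htle
      (by show decide (0 ≤ dFB.getD t (-1)) = true
          rw [decide_eq_true_eq, hvalB t htle]; exact hpt)
      (by
        intro k hk
        show decide (0 ≤ dFB.getD k (-1)) = false
        rw [decide_eq_false_iff_not]
        by_cases hkN : k ≤ hN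
        · rw [hvalB k hkN, hmax k hk hkN]; simp
        · rw [hoobB k (by omega)]; omega)
  rw [hfoldB]
  have hht : half - ((hN - t : Nat) : Int) = (t : Int) := by omega
  rw [hht]
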